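-- pv_equiv track=rewrite | github.com/miso-mk2/example | python_basic/part1/p142.py | kansu
-- ===== SOURCE A (Python) =====
-- def kansu(str1):
--
--     num1 = 0
--     for str3 in str1:
--
--         if str3 == '0':
--             num1 += 1
--         elif num1 > 0:
--             num1 -= 1
--
--     if num1 == 0:
--         return True
--     else:
--         return False
-- ===== SOURCE B (Python) =====
-- def kansu(str1):
--     s = 0
--     m = 0
--     for c in str1:
--         s += 1 if c == '0' else -1
--         if s < m:
--             m = s
--     return s == m
-- ===== Notes on version B (the rewrite author's own statement) =====
-- stated objective: alternative
-- what changed: Replaces the clamped-at-zero counter with an unclamped signed prefix sum plus a tracked running minimum, returning whether the final sum equals the minimum (Lindley-style identity); no clamping branch remains.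
import Mathlib
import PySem

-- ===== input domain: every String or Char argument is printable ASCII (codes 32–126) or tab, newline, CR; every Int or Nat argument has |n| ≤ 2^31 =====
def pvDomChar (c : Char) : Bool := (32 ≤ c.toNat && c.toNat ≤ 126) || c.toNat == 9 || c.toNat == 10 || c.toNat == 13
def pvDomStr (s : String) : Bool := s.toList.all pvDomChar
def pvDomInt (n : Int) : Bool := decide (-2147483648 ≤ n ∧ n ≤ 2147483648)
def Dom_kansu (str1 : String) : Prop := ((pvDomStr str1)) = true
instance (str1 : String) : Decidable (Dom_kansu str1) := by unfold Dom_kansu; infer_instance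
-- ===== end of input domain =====

-- B replaces A's clamped counter by an unclamped prefix sum with a tracked minimum (alternative decomposition, same cost).

-- ===== PORT A =====
def kansu (str1 : String) : Bool :=
  let num1 : Int :=
    str1.toList.foldl
      (fun n c => if c = '0' then n + 1 else if n > 0 then n - 1 else n) 0
  if num1 = 0 then true else false

-- ===== PORT B =====
def kansu_alt (str1 : String) : Bool :=
  let p : Int × Int :=
    str1.toList.foldl
      (fun p c =>
        let s := p.1 + (if c = '0' then 1 else -1)
        (s, if s < p.2 then s else p.2))
      (0, 0)
  decide (p.1 = p.2)

-- ===== PRECONDITION & SPEC =====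
def Spec_kansu (str1 : String) (out : Bool) : Prop := out = kansu_alt str1
instance (str1 : String) (out : Bool) : Decidable (Spec_kansu str1 out) := by unfold Spec_kansu; infer_instance

-- ===== CLAIM (what is proved, stated in full; the proofs are below) =====
def Claim_equal_kansu : Prop := ∀ (str1 : String), Dom_kansu str1 → Spec_kansu str1 (kansu str1)

-- ===== LEMMAS AND PROOFS =====

-- Loop invariant: A's clamped counter equals (prefix sum − running minimum).
theorem kansu_inv (l : List Char) (n s m : Int) (h : n = s - m) (hm : m ≤ s) :
    (l.foldl (fun n c => if c = '0' then n + 1 else if n > 0 then n - 1 else n) n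
      = (l.foldl (fun p c =>
          let s := p.1 + (if c = '0' then 1 else -1)
          (s, if s < p.2 then s else p.2)) (s, m)).1
        - (l.foldl (fun p c =>
          let s := p.1 + (if c = '0' then 1 else -1)
          (s, if s < p.2 then s else p.2)) (s, m)).2)
    ∧ (l.foldl (fun p c =>
          let s := p.1 + (if c = '0' then 1 else -1)
          (s, if s < p.2 then s else p.2)) (s, m)).2
        ≤ (l.foldl (fun p c =>
          let s := p.1 + (if c = '0' then 1 else -1)
          (s, if s < p.2 then s else p.2)) (s, m)).1 := by
  induction l generalizing n s m with
  | nil => exact ⟨h, hm⟩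
  | cons c t ih =>
    simp only [List.foldl_cons]
    by_cases hc : c = '0' <;> simp only [hc, if_true, if_false, ite_true, ite_false] <;>
      split_ifs <;> exact ih _ _ _ (by omega) (by omega)

-- ===== VERDICT (by name: the statement is the Claim_ definition above) =====
theorem kansu_spec : Claim_equal_kansu := by
  intro str1 _
  unfold Spec_kansu kansu kansu_alt
  obtain ⟨h1, _⟩ := kansu_inv str1.toList 0 0 0 (by omega) (by omega)
  simp only []
  rw [h1]
  by_cases h : (str1.toList.foldl (fun p c =>
        let s := p.1 + (if c = '0' then 1 else -1)
        (s, if s < p.2 then s else p.2)) (0, 0)).1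
      = (str1.toList.foldl (fun p c =>
        let s := p.1 + (if c = '0' then 1 else -1)
        (s, if s < p.2 then s else p.2)) (0, 0)).2 <;>
    simp [h, sub_eq_zero]
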